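-- pv_equiv track=rewrite | github.com/MakiAfom/Mauchline-learning-Problems- | python/max_non_overlapping_rectangles.py | max_non_overlapping_rectangles
-- ===== SOURCE A (Python) =====
-- def max_non_overlapping_rectangles(grid):
--     """
--     Given a 2D grid of size m x n, where each cell represents a building, find the maximum number of non-overlapping rectangular areas that can be constructed within the grid, such that each area satisfies the following conditions:
--
--     1. The area must be a rectangle, with its sides parallel to the grid axes.
--     2. The area must contain only cells with a value of 1, representing a building.
--     3. The area must have a height and width of at least 2 units.
--     4. The area must not overlap with any other area.
--
--     Args:
--         grid (List[List[int]]): A 2D grid, where grid[i][j] is 1 if there is a building at that cell, and 0 otherwise.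
--
--     Returns:
--         int: The maximum number of non-overlapping rectangular areas that can be constructed within the grid.
--     """
--     m, n = len(grid), len(grid[0])
--     used = [[False] * n for _ in range(m)]
--     count = 0
--
--     def can_form_rectangle(x, y, h, w):
--         for i in range(x, x + h):
--             for j in range(y, y + w):
--                 if i >= m or j >= n or grid[i][j] == 0 or used[i][j]:
--                     return False
--         return True
--
--     def mark_rectangle(x, y, h, w):
--         for i in range(x, x + h):
--             for j in range(y, y + w):
--                 used[i][j] = True
--
--     for i in range(m):
--         for j in range(n):
--             if grid[i][j] == 1 and not used[i][j]:
--                 for h in range(2, m - i + 1):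
--                     for w in range(2, n - j + 1):
--                         if can_form_rectangle(i, j, h, w):
--                             mark_rectangle(i, j, h, w)
--                             count += 1
--                             break
--
--     return count
-- ===== SOURCE B (Python) =====
-- def max_non_overlapping_rectangles(grid):
--     # Greedy placement only ever succeeds with a 2x2 block anchored at the
--     # current cell (any larger all-ones rectangle contains that 2x2 block),
--     # so one O(1) check per cell suffices; 'used' is a set of marked cells.
--     m, n = len(grid), len(grid[0])
--     used = set()
--     count = 0
--     for i in range(m - 1):
--         for j in range(n - 1):
--             if (grid[i][j] == 1
--                     and grid[i][j + 1] != 0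
--                     and grid[i + 1][j] != 0
--                     and grid[i + 1][j + 1] != 0
--                     and (i, j) not in used
--                     and (i, j + 1) not in used
--                     and (i + 1, j) not in used
--                     and (i + 1, j + 1) not in used):
--                 used.add((i, j))
--                 used.add((i, j + 1))
--                 used.add((i + 1, j))
--                 used.add((i + 1, j + 1))
--                 count += 1
--     return count
-- ===== Notes on version B (the rewrite author's own statement) =====
-- stated objective: faster
-- what changed: A tries every rectangle height/width from each anchor with an O(h*w) scan per candidate; B observes that the greedy search can only ever place the 2x2 block at the anchor (any larger all-ones rectangle contains it), so it does a single pass checking each 2x2 window in O(1) with a set of used cells.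
import Mathlib
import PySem

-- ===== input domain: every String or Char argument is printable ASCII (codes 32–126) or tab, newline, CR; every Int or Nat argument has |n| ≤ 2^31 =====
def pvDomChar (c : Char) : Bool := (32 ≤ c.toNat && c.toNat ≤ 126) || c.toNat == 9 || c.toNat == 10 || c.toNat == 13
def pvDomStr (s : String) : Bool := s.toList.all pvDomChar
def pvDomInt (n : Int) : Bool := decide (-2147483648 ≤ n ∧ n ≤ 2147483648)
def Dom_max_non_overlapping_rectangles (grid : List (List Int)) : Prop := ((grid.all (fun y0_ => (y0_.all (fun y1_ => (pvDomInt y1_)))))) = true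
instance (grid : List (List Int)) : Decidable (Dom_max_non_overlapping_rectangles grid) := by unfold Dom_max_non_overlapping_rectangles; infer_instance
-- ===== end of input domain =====

-- B replaces A's per-anchor search over all rectangle heights/widths by a single
-- O(1) check of the 2x2 window at each cell (the only rectangle A ever places),
-- tracking used cells in a set; objective: faster.

-- ===== PORT A =====
-- grid[i][j] (every admitted read is in range; the default is never observed)
def pvCell (grid : List (List Int)) (i j : Int) : Int :=
  PySem.List.pyGetD (PySem.List.pyGetD grid i []) j 0

-- used[i][j]
def pvUsedAt (used : List (List Bool)) (i j : Int) : Bool :=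
  PySem.List.pyGetD (PySem.List.pyGetD used i []) j false

-- the test 'i >= m or j >= n or grid[i][j] == 0 or used[i][j]' inside can_form_rectangle
def pvBad (grid : List (List Int)) (m n : Int) (used : List (List Bool)) (i j : Int) : Bool :=
  decide (m ≤ i) || decide (n ≤ j) || (pvCell grid i j == 0) || pvUsedAt used i j

-- can_form_rectangle(x, y, h, w)
def pvCanForm (grid : List (List Int)) (m n : Int) (used : List (List Bool))
    (x y h w : Int) : Bool :=
  (PySem.List.pyRange x (x + h) 1).all (fun i =>
    (PySem.List.pyRange y (y + w) 1).all (fun j => !pvBad grid m n used i j))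

-- used[i][j] = v
def pvSet2 (used : List (List Bool)) (i j : Int) (v : Bool) : List (List Bool) :=
  PySem.List.pySetD used i (PySem.List.pySetD (PySem.List.pyGetD used i []) j v)

-- mark_rectangle(x, y, h, w)
def pvMark (used : List (List Bool)) (x y h w : Int) : List (List Bool) :=
  (PySem.List.pyRange x (x + h) 1).foldl (fun u i =>
    (PySem.List.pyRange y (y + w) 1).foldl (fun u' j => pvSet2 u' i j true) u) used

-- the inner 'for w in range(2, n - j + 1): … break' loop (break = stop at first success)
def pvWLoop (grid : List (List Int)) (m n i j h : Int) :
    List Int → List (List Bool) × Int → List (List Bool) × Int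
  | [], st => st
  | w :: ws, st =>
      if pvCanForm grid m n st.1 i j h w then (pvMark st.1 i j h w, st.2 + 1)
      else pvWLoop grid m n i j h ws st

-- the body of the main double loop at cell (i, j)
def pvStepA (grid : List (List Int)) (m n : Int) (st : List (List Bool) × Int)
    (i j : Int) : List (List Bool) × Int :=
  if pvCell grid i j == 1 && !pvUsedAt st.1 i j then
    (PySem.List.pyRange 2 (m - i + 1) 1).foldl
      (fun st' h => pvWLoop grid m n i j h (PySem.List.pyRange 2 (n - j + 1) 1) st') st
  else st

def max_non_overlapping_rectangles (grid : List (List Int)) : Int :=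
  let m : Int := grid.length
  let n : Int := (PySem.List.pyGetD grid 0 []).length
  let used0 : List (List Bool) :=
    (PySem.List.pyRange 0 m 1).map (fun _ => PySem.List.pyRepeat [false] n)
  ((PySem.List.pyRange 0 m 1).foldl (fun st i =>
      (PySem.List.pyRange 0 n 1).foldl (fun st' j => pvStepA grid m n st' i j) st)
    (used0, 0)).2

-- ===== PORT B =====
-- the body of B's single pass at cell (i, j): check the 2x2 window in O(1)
def pvAltStep (grid : List (List Int)) (st : PySem.Set (Int × Int) × Int)
    (i j : Int) : PySem.Set (Int × Int) × Int :=
  if pvCell grid i j == 1 && !(pvCell grid i (j + 1) == 0) && !(pvCell grid (i + 1) j == 0)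
      && !(pvCell grid (i + 1) (j + 1) == 0)
      && !(PySem.Set.contains st.1 (i, j)) && !(PySem.Set.contains st.1 (i, j + 1))
      && !(PySem.Set.contains st.1 (i + 1, j)) && !(PySem.Set.contains st.1 (i + 1, j + 1)) then
    (PySem.Set.add (PySem.Set.add (PySem.Set.add (PySem.Set.add st.1 (i, j)) (i, j + 1))
        (i + 1, j)) (i + 1, j + 1), st.2 + 1)
  else st

def max_non_overlapping_rectangles_alt (grid : List (List Int)) : Int :=
  let m : Int := grid.length
  let n : Int := (PySem.List.pyGetD grid 0 []).length
  ((PySem.List.pyRange 0 (m - 1) 1).foldl (fun st i =>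
      (PySem.List.pyRange 0 (n - 1) 1).foldl (fun st' j => pvAltStep grid st' i j) st)
    (PySem.Set.empty, 0)).2

-- ===== PRECONDITION & SPEC =====
-- Pre_ excludes exactly the inputs where the Python A raises IndexError:
-- the empty grid (len(grid[0])) and ragged grids with a row shorter than row 0.
def Pre_max_non_overlapping_rectangles (grid : List (List Int)) : Prop :=
  grid ≠ [] ∧ ∀ row ∈ grid, (PySem.List.pyGetD grid 0 []).length ≤ row.length
instance (grid : List (List Int)) : Decidable (Pre_max_non_overlapping_rectangles grid) := by
  unfold Pre_max_non_overlapping_rectangles; infer_instance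
def pvWitness_max_non_overlapping_rectangles : List (List Int) := [[1, 1], [1, 1]]

def Spec_max_non_overlapping_rectangles (grid : List (List Int)) (out : Int) : Prop :=
  out = max_non_overlapping_rectangles_alt grid
instance (grid : List (List Int)) (out : Int) :
    Decidable (Spec_max_non_overlapping_rectangles grid out) := by
  unfold Spec_max_non_overlapping_rectangles; infer_instance

-- ===== CLAIM (what is proved, stated in full; the proofs are below) =====
def Claim_equal_max_non_overlapping_rectangles : Prop :=
  ∀ (grid : List (List Int)), Dom_max_non_overlapping_rectangles grid →
    Pre_max_non_overlapping_rectangles grid →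
    Spec_max_non_overlapping_rectangles grid (max_non_overlapping_rectangles grid)

-- ===== LEMMAS AND PROOFS =====

-- a fold whose step fixes the start state is the identity
theorem pv_foldl_fixed {α β : Type} (f : α → β → α) (s : α) (l : List β)
    (h : ∀ x ∈ l, f s x = s) : l.foldl f s = s := by
  induction l with
  | nil => rfl
  | cons x xs ih =>
      simp only [List.foldl_cons, h x (by simp)]
      exact ih (fun y hy => h y (by simp [hy]))

-- two folds over the same index list preserve a simulation relation
theorem pv_foldl_rel {σ τ : Type} (R : σ → τ → Prop) (F : σ → Int → σ) (G : τ → Int → τ)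
    (l : List Int) (h : ∀ s t x, x ∈ l → R s t → R (F s x) (G t x)) :
    ∀ s t, R s t → R (l.foldl F s) (l.foldl G t) := by
  induction l with
  | nil => intro s t hr; exact hr
  | cons x xs ih =>
      intro s t hr
      simp only [List.foldl_cons]
      exact ih (fun s' t' y hy => h s' t' y (by simp [hy])) _ _ (h s t x (by simp) hr)

theorem pv_pyRange_two (a : Int) : PySem.List.pyRange a (a + 2) 1 = [a, a + 1] := by
  rw [PySem.List.pyRange_one_cons (by omega), PySem.List.pyRange_one_cons (by omega),
    PySem.List.pyRange_one_eq_nil (by omega)]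

theorem pv_canForm_iff (grid : List (List Int)) (m n : Int) (u : List (List Bool))
    (x y h w : Int) :
    pvCanForm grid m n u x y h w = true ↔
      ∀ a b : Int, x ≤ a → a < x + h → y ≤ b → b < y + w → pvBad grid m n u a b = false := by
  simp only [pvCanForm, List.all_eq_true, PySem.List.mem_pyRange_one, Bool.not_eq_eq_eq_not,
    Bool.not_true]
  constructor
  · intro H a b h1 h2 h3 h4; exact H a ⟨h1, h2⟩ b ⟨h3, h4⟩
  · intro H a ha b hb; exact H a b ha.1 ha.2 hb.1 hb.2

theorem pv_canForm_mono (grid : List (List Int)) (m n : Int) (u : List (List Bool))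
    (x y h w : Int) (hh : 2 ≤ h) (hw : 2 ≤ w)
    (hc : pvCanForm grid m n u x y h w = true) :
    pvCanForm grid m n u x y 2 2 = true := by
  rw [pv_canForm_iff] at hc ⊢
  intro a b h1 h2 h3 h4; exact hc a b h1 (by omega) h3 (by omega)

theorem pv_canForm_anchor (grid : List (List Int)) (m n : Int) (u : List (List Bool))
    (x y h w : Int) (hh : 1 ≤ h) (hw : 1 ≤ w)
    (hc : pvCanForm grid m n u x y h w = true) :
    pvBad grid m n u x y = false := by
  rw [pv_canForm_iff] at hc
  exact hc x y (le_refl x) (by omega) (le_refl y) (by omega)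

-- the w-loop is the identity when no rectangle can be formed
theorem pv_wLoop_fail (grid : List (List Int)) (m n i j h : Int) (ws : List Int)
    (st : List (List Bool) × Int)
    (hall : ∀ w ∈ ws, pvCanForm grid m n st.1 i j h w = false) :
    pvWLoop grid m n i j h ws st = st := by
  induction ws with
  | nil => rfl
  | cons w ws ih =>
      rw [pvWLoop, hall w (by simp)]
      simp only [Bool.false_eq_true, if_false]
      exact ih (fun w' hw' => hall w' (by simp [hw']))

-- shape of used matrices: m rows of n entries
def pvShape (grid : List (List Int)) (u : List (List Bool)) : Prop :=
  u.length = grid.length ∧ ∀ r ∈ u, r.length = (PySem.List.pyGetD grid 0 []).length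

theorem pv_set2_length (u : List (List Bool)) (a b : Int) (v : Bool) :
    (pvSet2 u a b v).length = u.length := by
  simp [pvSet2, PySem.List.length_pySetD]

theorem pv_set2_shape (grid : List (List Int)) (u : List (List Bool)) (a b : Int) (v : Bool)
    (ha : 0 ≤ a) (ha2 : a < (u.length : Int)) (hs : pvShape grid u) :
    pvShape grid (pvSet2 u a b v) := by
  obtain ⟨h1, h2⟩ := hs
  refine ⟨by rw [pv_set2_length, h1], ?_⟩
  intro r hr
  simp only [pvSet2, PySem.List.pySetD_of_nonneg _ _ ha] at hr
  rcases List.mem_or_eq_of_mem_set hr with hmem | heq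
  · exact h2 r hmem
  · subst heq
    rw [PySem.List.length_pySetD, PySem.List.pyGetD_eq_getElem _ _ ha (by omega)]
    exact h2 _ (List.getElem_mem _)

-- lookup after a single used[a][b] = v
theorem pv_usedAt_set2 (grid : List (List Int)) (u : List (List Bool)) (a b i j : Int) (v : Bool)
    (hs : pvShape grid u)
    (ha0 : 0 ≤ a) (ha : a < (u.length : Int))
    (hb0 : 0 ≤ b) (hb : b < ((PySem.List.pyGetD grid 0 []).length : Int))
    (hi0 : 0 ≤ i) (hj0 : 0 ≤ j) :
    pvUsedAt (pvSet2 u a b v) i j = if i = a ∧ j = b then v else pvUsedAt u i j := by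
  obtain ⟨A, rfl⟩ := Int.eq_ofNat_of_zero_le ha0
  obtain ⟨B, rfl⟩ := Int.eq_ofNat_of_zero_le hb0
  obtain ⟨I, rfl⟩ := Int.eq_ofNat_of_zero_le hi0
  obtain ⟨J, rfl⟩ := Int.eq_ofNat_of_zero_le hj0
  have hAlen : A < u.length := by omega
  have hrowlen : (PySem.List.pyGetD u (A : Int) ([] : List Bool)).length
      = (PySem.List.pyGetD grid 0 []).length := by
    apply hs.2
    exact PySem.List.pyGetD_mem _ _ (by rw [PySem.Raise.InRange]; omega)
  have hBlen : B < (PySem.List.pyGetD u (A : Int) ([] : List Bool)).length := by omega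
  rw [pvUsedAt, pvSet2, PySem.List.pyGetD_pySetD_natCast u A I _ _ hAlen]
  by_cases hIA : I = A
  · subst hIA
    rw [if_pos rfl, PySem.List.pyGetD_pySetD_natCast _ B J _ _ hBlen]
    by_cases hJB : J = B
    · subst hJB; simp
    · rw [if_neg hJB, if_neg (by simp [hJB]), pvUsedAt]
  · rw [if_neg hIA, if_neg (by simp [hIA]), pvUsedAt]

-- the marked 2x2 block, written out
theorem pv_mark22_eq (u : List (List Bool)) (i j : Int) :
    pvMark u i j 2 2 =
      pvSet2 (pvSet2 (pvSet2 (pvSet2 u i j true) i (j + 1) true) (i + 1) j true)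
        (i + 1) (j + 1) true := by
  rw [pvMark, pv_pyRange_two, pv_pyRange_two]; rfl

theorem pv_mark22_shape (grid : List (List Int)) (u : List (List Bool)) (i j : Int)
    (hi : 0 ≤ i) (hm : i + 1 < (grid.length : Int)) (hs : pvShape grid u) :
    pvShape grid (pvMark u i j 2 2) := by
  have s1 := pv_set2_shape grid u i j true hi (by rw [hs.1]; omega) hs
  have s2 := pv_set2_shape grid _ i (j + 1) true hi (by rw [s1.1]; omega) s1
  have s3 := pv_set2_shape grid _ (i + 1) j true (by omega) (by rw [s2.1]; omega) s2
  have s4 := pv_set2_shape grid _ (i + 1) (j + 1) true (by omega) (by rw [s3.1]; omega) s3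
  rw [pv_mark22_eq]; exact s4

-- pointwise lookup in the marked 2x2 block
theorem pv_usedAt_mark22 (grid : List (List Int)) (u : List (List Bool)) (i j a b : Int)
    (hs : pvShape grid u) (hi0 : 0 ≤ i) (hj0 : 0 ≤ j)
    (hm : i + 1 < (grid.length : Int))
    (hn : j + 1 < ((PySem.List.pyGetD grid 0 []).length : Int))
    (ha0 : 0 ≤ a) (hb0 : 0 ≤ b) :
    pvUsedAt (pvMark u i j 2 2) a b =
      if (a = i ∧ b = j) ∨ (a = i ∧ b = j + 1) ∨ (a = i + 1 ∧ b = j) ∨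
          (a = i + 1 ∧ b = j + 1) then true
      else pvUsedAt u a b := by
  have s1 : pvShape grid (pvSet2 u i j true) :=
    pv_set2_shape _ _ _ _ _ hi0 (by rw [hs.1]; omega) hs
  have s2 : pvShape grid (pvSet2 (pvSet2 u i j true) i (j + 1) true) :=
    pv_set2_shape _ _ _ _ _ hi0 (by rw [s1.1]; omega) s1
  have s3 : pvShape grid (pvSet2 (pvSet2 (pvSet2 u i j true) i (j + 1) true) (i + 1) j true) :=
    pv_set2_shape _ _ _ _ _ (by omega) (by rw [s2.1]; omega) s2
  rw [pv_mark22_eq]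
  rw [pv_usedAt_set2 grid _ _ _ _ _ _ s3 (by omega) (by rw [s3.1]; omega) (by omega) hn ha0 hb0]
  rw [pv_usedAt_set2 grid _ _ _ _ _ _ s2 (by omega) (by rw [s2.1]; omega) hj0 (by omega) ha0 hb0]
  rw [pv_usedAt_set2 grid _ _ _ _ _ _ s1 hi0 (by rw [s1.1]; omega) (by omega) hn ha0 hb0]
  rw [pv_usedAt_set2 grid _ _ _ _ _ _ hs hi0 (by rw [hs.1]; omega) hj0 (by omega) ha0 hb0]
  split_ifs <;> first | rfl | omega

-- membership in B's used set after an add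
theorem pv_contains_add {α : Type} [BEq α] [LawfulBEq α] (s : PySem.Set α) (x y : α) :
    PySem.Set.contains (PySem.Set.add s x) y = (PySem.Set.contains s y || y == x) := by
  rw [Bool.eq_iff_iff]
  simp only [Bool.or_eq_true, beq_iff_eq, PySem.Set.contains_iff, PySem.Set.mem_add]

-- pvInv relates A's used matrix to B's used set (pointwise, on nonnegative indices)
def pvInv (grid : List (List Int)) (u : List (List Bool)) (S : PySem.Set (Int × Int)) : Prop :=
  pvShape grid u ∧
  ∀ i j : Int, 0 ≤ i → 0 ≤ j → pvUsedAt u i j = PySem.Set.contains S (i, j)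

def pvRel (grid : List (List Int)) (st : List (List Bool) × Int)
    (ts : PySem.Set (Int × Int) × Int) : Prop :=
  pvInv grid st.1 ts.1 ∧ st.2 = ts.2

-- A's step at cell (i,j) collapses to: place the 2x2 block iff it is placeable
theorem pv_stepA_char (grid : List (List Int)) (st : List (List Bool) × Int) (i j : Int)
    (hs : pvShape grid st.1) (hi0 : 0 ≤ i) (hj0 : 0 ≤ j) :
    pvStepA grid (grid.length : Int) ((PySem.List.pyGetD grid 0 []).length : Int) st i j =
      if pvCell grid i j == 1 && !pvUsedAt st.1 i j &&
          pvCanForm grid (grid.length : Int) ((PySem.List.pyGetD grid 0 []).length : Int)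
            st.1 i j 2 2 then
        (pvMark st.1 i j 2 2, st.2 + 1)
      else st := by
  set m : Int := (grid.length : Int) with hmdef
  set n : Int := ((PySem.List.pyGetD grid 0 []).length : Int) with hndef
  rw [pvStepA]
  by_cases hguard : (pvCell grid i j == 1 && !pvUsedAt st.1 i j) = true
  · rw [if_pos hguard]
    by_cases hcf : pvCanForm grid m n st.1 i j 2 2 = true
    · -- the 2x2 block is placeable: h = 2, w = 2 fires first, everything after is a no-op
      have hb11 := (pv_canForm_iff grid m n st.1 i j 2 2).mp hcf (i + 1) (j + 1)
        (by omega) (by omega) (by omega) (by omega)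
      simp only [pvBad, Bool.or_eq_false_iff, decide_eq_false_iff_not, not_le] at hb11
      have him : i + 1 < m := hb11.1.1.1
      have hjn : j + 1 < n := hb11.1.1.2
      rw [PySem.List.pyRange_one_cons (show (2:Int) < m - i + 1 by omega)]
      simp only [List.foldl_cons]
      rw [PySem.List.pyRange_one_cons (show (2:Int) < n - j + 1 by omega), pvWLoop, hcf]
      simp only [if_true]
      have hused : pvUsedAt (pvMark st.1 i j 2 2) i j = true := by
        rw [pv_usedAt_mark22 grid st.1 i j i j hs hi0 hj0 him hjn hi0 hj0]
        rw [if_pos (by omega)]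
      rw [pv_foldl_fixed]
      · rw [if_pos (by simp [hguard])]
      · intro h hh
        apply pv_wLoop_fail
        intro w hw
        rw [PySem.List.mem_pyRange_one] at hh
        have hw2 : 2 ≤ w := by
          rcases List.mem_cons.mp hw with rfl | hmem
          · omega
          · have := (PySem.List.mem_pyRange_one.mp hmem).1; omega
        cases hcw : pvCanForm grid m n (pvMark st.1 i j 2 2, st.2 + 1).1 i j h w with
        | false => rfl
        | true =>
            exfalso
            have := pv_canForm_anchor grid m n _ i j h w (by omega) (by omega) hcw
            rw [pvBad] at this
            simp only [hused, Bool.or_true] at this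
            exact Bool.true_eq_false.mp this
    · -- no 2x2 block: every candidate rectangle fails, the whole search is a no-op
      rw [pv_foldl_fixed]
      · rw [if_neg (by simp [hcf])]
      · intro h hh
        apply pv_wLoop_fail
        intro w hw
        rw [PySem.List.mem_pyRange_one] at hh hw
        cases hcw : pvCanForm grid m n st.1 i j h w with
        | false => rfl
        | true =>
            exact absurd (pv_canForm_mono grid m n st.1 i j h w (by omega) (by omega) hcw) hcf
  · rw [if_neg hguard]
    rw [if_neg (show ¬(pvCell grid i j == 1 && !pvUsedAt st.1 i j &&
        pvCanForm grid m n st.1 i j 2 2) = true by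
      simp only [Bool.and_eq_true]
      rintro ⟨⟨h1, h2⟩, _⟩
      exact hguard (by rw [Bool.and_eq_true]; exact ⟨h1, h2⟩))]

-- A's step is the identity in the last row / last column
theorem pv_stepA_lastRow (grid : List (List Int)) (m n : Int) (st : List (List Bool) × Int)
    (j : Int) : pvStepA grid m n st (m - 1) j = st := by
  rw [pvStepA, show m - (m - 1) + 1 = 2 by ring,
    PySem.List.pyRange_one_eq_nil (show (2:Int) ≤ 2 by omega)]
  simp

theorem pv_stepA_lastCol (grid : List (List Int)) (m n : Int) (st : List (List Bool) × Int)
    (i : Int) : pvStepA grid m n st i (n - 1) = st := by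
  rw [pvStepA, show n - (n - 1) + 1 = 2 by ring,
    PySem.List.pyRange_one_eq_nil (a := 2) (b := 2) (by omega)]
  simp only [pvWLoop, PySem.List.foldl_ignore, ite_self]

-- one cell preserves the simulation
theorem pv_step_sim (grid : List (List Int)) (st : List (List Bool) × Int)
    (ts : PySem.Set (Int × Int) × Int) (i j : Int)
    (hr : pvRel grid st ts) (hi0 : 0 ≤ i) (hj0 : 0 ≤ j)
    (hm : i < (grid.length : Int) - 1)
    (hn : j < ((PySem.List.pyGetD grid 0 []).length : Int) - 1) :
    pvRel grid
      (pvStepA grid (grid.length : Int) ((PySem.List.pyGetD grid 0 []).length : Int) st i j)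
      (pvAltStep grid ts i j) := by
  obtain ⟨⟨hshape, hpt⟩, hcnt⟩ := hr
  set m : Int := (grid.length : Int) with hmdef
  set n : Int := ((PySem.List.pyGetD grid 0 []).length : Int) with hndef
  rw [pv_stepA_char grid st i j hshape hi0 hj0, pvAltStep]
  have hcond : (pvCell grid i j == 1 && !pvUsedAt st.1 i j &&
      pvCanForm grid m n st.1 i j 2 2) =
      (pvCell grid i j == 1 && !(pvCell grid i (j + 1) == 0) && !(pvCell grid (i + 1) j == 0)
        && !(pvCell grid (i + 1) (j + 1) == 0)
        && !(PySem.Set.contains ts.1 (i, j)) && !(PySem.Set.contains ts.1 (i, j + 1))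
        && !(PySem.Set.contains ts.1 (i + 1, j)) && !(PySem.Set.contains ts.1 (i + 1, j + 1))) := by
    rw [Bool.eq_iff_iff]
    simp only [Bool.and_eq_true, Bool.not_eq_true', beq_iff_eq, beq_eq_false_iff_ne]
    rw [← hpt i j hi0 hj0, ← hpt i (j + 1) hi0 (by omega), ← hpt (i + 1) j (by omega) hj0,
      ← hpt (i + 1) (j + 1) (by omega) (by omega)]
    constructor
    · rintro ⟨⟨h1, hu⟩, hcf⟩
      have g01 := (pv_canForm_iff grid m n st.1 i j 2 2).mp hcf i (j + 1)
        (by omega) (by omega) (by omega) (by omega)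
      have g10 := (pv_canForm_iff grid m n st.1 i j 2 2).mp hcf (i + 1) j
        (by omega) (by omega) (by omega) (by omega)
      have g11 := (pv_canForm_iff grid m n st.1 i j 2 2).mp hcf (i + 1) (j + 1)
        (by omega) (by omega) (by omega) (by omega)
      simp only [pvBad, Bool.or_eq_false_iff, beq_eq_false_iff_ne, decide_eq_false_iff_not] at g01 g10 g11
      exact ⟨⟨⟨⟨⟨⟨⟨h1, g01.1.2⟩, g10.1.2⟩, g11.1.2⟩, hu⟩, g01.2⟩, g10.2⟩, g11.2⟩
    · rintro ⟨⟨⟨⟨⟨⟨⟨h1, h01⟩, h10⟩, h11⟩, m00⟩, m01⟩, m10⟩, m11⟩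
      refine ⟨⟨h1, m00⟩, ?_⟩
      rw [pv_canForm_iff]
      intro a b ha1 ha2 hb1 hb2
      have hacase : a = i ∨ a = i + 1 := by omega
      have hbcase : b = j ∨ b = j + 1 := by omega
      simp only [pvBad, Bool.or_eq_false_iff, beq_eq_false_iff_ne, decide_eq_false_iff_not]
      rcases hacase with rfl | rfl <;> rcases hbcase with rfl | rfl
      · exact ⟨⟨⟨by omega, by omega⟩, by rw [h1]; omega⟩, m00⟩
      · exact ⟨⟨⟨by omega, by omega⟩, h01⟩, m01⟩
      · exact ⟨⟨⟨by omega, by omega⟩, h10⟩, m10⟩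
      · exact ⟨⟨⟨by omega, by omega⟩, h11⟩, m11⟩
  rw [hcond]
  cases hc : (pvCell grid i j == 1 && !(pvCell grid i (j + 1) == 0) && !(pvCell grid (i + 1) j == 0)
        && !(pvCell grid (i + 1) (j + 1) == 0)
        && !(PySem.Set.contains ts.1 (i, j)) && !(PySem.Set.contains ts.1 (i, j + 1))
        && !(PySem.Set.contains ts.1 (i + 1, j)) && !(PySem.Set.contains ts.1 (i + 1, j + 1))) with
  | false => exact ⟨⟨hshape, hpt⟩, hcnt⟩
  | true =>
      simp only [if_true]
      refine ⟨⟨pv_mark22_shape grid st.1 i j hi0 (by omega) hshape, ?_⟩, by simp [hcnt]⟩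
      intro a b ha0 hb0
      rw [pv_usedAt_mark22 grid st.1 i j a b hshape hi0 hj0 (by omega) (by omega) ha0 hb0]
      rw [pv_contains_add, pv_contains_add, pv_contains_add, pv_contains_add]
      rw [hpt a b ha0 hb0]
      split_ifs with hcase
      · rw [Bool.eq_iff_iff]
        simp only [Bool.or_eq_true, beq_iff_eq, Prod.mk.injEq, true_iff]
        tauto
      · rw [Bool.eq_iff_iff]
        simp only [Bool.or_eq_true, beq_iff_eq, Prod.mk.injEq]
        constructor
        · intro hmem; exact Or.inl (Or.inl (Or.inl (Or.inl hmem)))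
        · rintro ((((hmem | hx) | hx) | hx) | hx)
          · exact hmem
          all_goals (exfalso; apply hcase; tauto)

theorem pv_pyGetD_of_some {α : Type} (xs : List α) (i : Int) (x : α) (d : α)
    (h : PySem.List.pyGet? xs i = some x) : PySem.List.pyGetD xs i d = x := by
  simp [PySem.List.pyGetD, h]

-- initial states are related
theorem pv_init_rel (grid : List (List Int)) :
    pvRel grid
      ((PySem.List.pyRange 0 (grid.length : Int) 1).map
          (fun _ => PySem.List.pyRepeat [false] ((PySem.List.pyGetD grid 0 []).length : Int)), 0)
      ((PySem.Set.empty : PySem.Set (Int × Int)), 0) := by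
  refine ⟨⟨⟨by simp [PySem.List.length_pyRange_one], ?_⟩, ?_⟩, rfl⟩
  · intro r hr
    simp only [List.mem_map] at hr
    obtain ⟨x, _, rfl⟩ := hr
    rw [PySem.List.pyRepeat_singleton, List.length_replicate]
    omega
  · intro i j hi0 hj0
    obtain ⟨I, rfl⟩ := Int.eq_ofNat_of_zero_le hi0
    obtain ⟨J, rfl⟩ := Int.eq_ofNat_of_zero_le hj0
    rw [pvUsedAt]
    have hcontains : PySem.Set.contains (PySem.Set.empty : PySem.Set (Int × Int))
        ((I : Int), (J : Int)) = false := rfl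
    rw [hcontains]
    show PySem.List.pyGetD (PySem.List.pyGetD
      ((PySem.List.pyRange 0 (grid.length : Int) 1).map
        (fun _ => PySem.List.pyRepeat [false] ((PySem.List.pyGetD grid 0 []).length : Int)))
      ((I : Nat) : Int) []) ((J : Nat) : Int) false = false
    have hget : ∀ (r : List Bool), (∀ x ∈ r, x = false) →
        PySem.List.pyGetD r ((J : Nat) : Int) false = false := by
      intro r hr
      rw [PySem.List.pyGetD_natCast]
      rcases h : r[J]? with _ | x
      · simp [List.getD, h]
      · simp [List.getD, h, hr x (List.mem_of_getElem? h)]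
    apply hget
    intro x hx
    rcases hIn : PySem.List.pyGet? ((PySem.List.pyRange 0 (grid.length : Int) 1).map
        (fun _ => PySem.List.pyRepeat [false]
          ((PySem.List.pyGetD grid 0 []).length : Int))) ((I : Nat) : Int) with _ | row
    · rw [PySem.List.pyGetD_of_none _ _ _ hIn] at hx
      simp at hx
    · have hrowmem := PySem.List.mem_of_pyGet?_eq_some _ hIn
      rw [pv_pyGetD_of_some _ _ _ _ hIn] at hx
      simp only [List.mem_map] at hrowmem
      obtain ⟨y, _, hy⟩ := hrowmem
      rw [← hy, PySem.List.pyRepeat_singleton] at hx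
      exact List.eq_of_mem_replicate hx

-- one full row preserves the simulation
theorem pv_row_sim (grid : List (List Int)) (st : List (List Bool) × Int)
    (ts : PySem.Set (Int × Int) × Int) (i : Int)
    (hr : pvRel grid st ts) (hi0 : 0 ≤ i) (hm : i < (grid.length : Int) - 1) :
    pvRel grid
      ((PySem.List.pyRange 0 ((PySem.List.pyGetD grid 0 []).length : Int) 1).foldl
        (fun st' j => pvStepA grid (grid.length : Int)
          ((PySem.List.pyGetD grid 0 []).length : Int) st' i j) st)
      ((PySem.List.pyRange 0 (((PySem.List.pyGetD grid 0 []).length : Int) - 1) 1).foldl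
        (fun ts' j => pvAltStep grid ts' i j) ts) := by
  set n : Int := ((PySem.List.pyGetD grid 0 []).length : Int) with hndef
  by_cases hn0 : n ≤ 0
  · rw [PySem.List.pyRange_one_eq_nil (by omega), PySem.List.pyRange_one_eq_nil (by omega)]
    exact hr
  · have hsplit : PySem.List.pyRange 0 n 1 = PySem.List.pyRange 0 (n - 1) 1 ++ [n - 1] := by
      conv_lhs => rw [show n = (n - 1) + 1 by ring]
      exact PySem.List.pyRange_one_succ_right (by omega)
    rw [hsplit, List.foldl_append]
    simp only [List.foldl_cons, List.foldl_nil]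
    rw [pv_stepA_lastCol]
    exact pv_foldl_rel (pvRel grid) _ _ _
      (fun s t x hx hrel => pv_step_sim grid s t i x hrel hi0
        (by rw [PySem.List.mem_pyRange_one] at hx; exact hx.1) hm
        (by rw [PySem.List.mem_pyRange_one] at hx; exact hx.2))
      st ts hr

-- ===== VERDICT (by name: the statement is the Claim_ definition above) =====
theorem max_non_overlapping_rectangles_spec : Claim_equal_max_non_overlapping_rectangles := by
  intro grid _ hpre
  unfold Spec_max_non_overlapping_rectangles
  obtain ⟨hne, _⟩ := hpre
  set m : Int := (grid.length : Int) with hmdef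
  set n : Int := ((PySem.List.pyGetD grid 0 []).length : Int) with hndef
  have hm1 : 1 ≤ m := by
    have : grid.length ≠ 0 := fun h => hne (List.eq_nil_of_length_eq_zero h)
    omega
  show ((PySem.List.pyRange 0 m 1).foldl (fun st i =>
      (PySem.List.pyRange 0 n 1).foldl (fun st' j => pvStepA grid m n st' i j) st)
      ((PySem.List.pyRange 0 m 1).map (fun _ => PySem.List.pyRepeat [false] n), 0)).2 =
    ((PySem.List.pyRange 0 (m - 1) 1).foldl (fun st i =>
      (PySem.List.pyRange 0 (n - 1) 1).foldl (fun st' j => pvAltStep grid st' i j) st)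
      (PySem.Set.empty, 0)).2
  have hsplit : PySem.List.pyRange 0 m 1 = PySem.List.pyRange 0 (m - 1) 1 ++ [m - 1] := by
    conv_lhs => rw [show m = (m - 1) + 1 by ring]
    exact PySem.List.pyRange_one_succ_right (by omega)
  rw [congrArg (List.foldl (fun st i =>
      (PySem.List.pyRange 0 n 1).foldl (fun st' j => pvStepA grid m n st' i j) st)
      ((PySem.List.pyRange 0 m 1).map (fun _ => PySem.List.pyRepeat [false] n), 0)) hsplit]
  rw [List.foldl_append]
  simp only [List.foldl_cons, List.foldl_nil]
  have hlastrow : ∀ st : List (List Bool) × Int,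
      (PySem.List.pyRange 0 n 1).foldl (fun st' j => pvStepA grid m n st' (m - 1) j) st = st := by
    intro st
    apply pv_foldl_fixed
    intro x _
    exact pv_stepA_lastRow grid m n st x
  rw [hlastrow]
  have hrel := pv_foldl_rel (pvRel grid)
    (fun st i => (PySem.List.pyRange 0 n 1).foldl (fun st' j => pvStepA grid m n st' i j) st)
    (fun ts i => (PySem.List.pyRange 0 (n - 1) 1).foldl (fun ts' j => pvAltStep grid ts' i j) ts)
    (PySem.List.pyRange 0 (m - 1) 1)
    (fun s t x hx hrel => pv_row_sim grid s t x hrel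
      (by rw [PySem.List.mem_pyRange_one] at hx; exact hx.1)
      (by rw [PySem.List.mem_pyRange_one] at hx; exact hx.2))
    _ _ (pv_init_rel grid)
  exact hrel.2
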